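-- pv_equiv track=rewrite | github.com/Emmanuelcsam/alignme | seed_calc.py | calc_seed
-- ===== SOURCE A (Python) =====
-- def calc_seed(choices):
--     seed = 0
--     value_ids = {
--         "Money": 1,
--         "Career Success": 2,
--         "Recognition": 3,
--         "Family Obligations": 4,
--         "Social Status": 5,
--         "Physical Appearance": 6,
--         "Romantic Validation": 7,
--         "Academic Achievement": 8,
--         "Power/Control": 9,
--         "Possessions/Luxury": 10,
--         "Others' Approval": 11,
--         "Competition/Winning": 12
--     }
--
--     for choice in choices:
--         if choice in value_ids:
--             seed = (seed * 13 + value_ids[choice]) % 256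
--
--     return seed
-- ===== SOURCE B (Python) =====
-- def calc_seed(choices):
--     names = [
--         "Money", "Career Success", "Recognition", "Family Obligations",
--         "Social Status", "Physical Appearance", "Romantic Validation",
--         "Academic Achievement", "Power/Control", "Possessions/Luxury",
--         "Others' Approval", "Competition/Winning"
--     ]
--     vals = [names.index(c) + 1 for c in choices if c in names]
--     n = len(vals)
--     return sum(v * pow(13, n - 1 - i, 256) for i, v in enumerate(vals)) % 256
-- ===== Notes on version B (the rewrite author's own statement) =====
-- stated objective: alternative
-- what changed: B replaces A's dict-filtered Horner loop by a two-stage computation: it looks values up by position in a name list (list.index instead of a dict), builds the filtered value list, and returns a closed-form weighted sum sum(v * pow(13, n-1-i, 256)) % 256 with explicit modular exponentiation instead of a rolling accumulator.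
import Mathlib
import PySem

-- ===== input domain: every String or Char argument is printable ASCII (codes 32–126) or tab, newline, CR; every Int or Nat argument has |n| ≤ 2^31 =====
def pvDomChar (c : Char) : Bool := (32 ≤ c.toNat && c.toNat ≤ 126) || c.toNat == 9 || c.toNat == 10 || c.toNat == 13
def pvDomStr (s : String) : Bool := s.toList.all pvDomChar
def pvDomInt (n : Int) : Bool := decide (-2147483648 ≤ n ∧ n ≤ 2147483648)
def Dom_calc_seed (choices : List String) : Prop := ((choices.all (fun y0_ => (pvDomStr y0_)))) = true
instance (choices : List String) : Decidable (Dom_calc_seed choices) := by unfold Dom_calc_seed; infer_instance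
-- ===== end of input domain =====

-- B computes the hash as a closed-form positional-weight sum (list.index lookup, modular
-- exponentiation per term) instead of A's dict-filtered Horner loop (alternative decomposition).

-- ===== PORT A =====
-- the value_ids dict literal of A
def pvValueIds : PySem.Dict String Int := PySem.Dict.ofList
  [("Money", 1), ("Career Success", 2), ("Recognition", 3), ("Family Obligations", 4),
   ("Social Status", 5), ("Physical Appearance", 6), ("Romantic Validation", 7),
   ("Academic Achievement", 8), ("Power/Control", 9), ("Possessions/Luxury", 10),
   ("Others' Approval", 11), ("Competition/Winning", 12)]

def calc_seed (choices : List String) : Int :=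
  choices.foldl (fun seed choice =>
    if pvValueIds.contains choice then
      PySem.Int.mod (seed * 13 + pvValueIds.getD choice 0) 256
    else seed) 0

-- ===== PORT B =====
-- the names list of B (values are position + 1)
def pvNames : List String :=
  ["Money", "Career Success", "Recognition", "Family Obligations", "Social Status",
   "Physical Appearance", "Romantic Validation", "Academic Achievement", "Power/Control",
   "Possessions/Luxury", "Others' Approval", "Competition/Winning"]

-- exponent n-1-i of pow(13, n-1-i, 256) is nonnegative (i < n), so `.toNat` is exact
def calc_seed_alt (choices : List String) : Int :=
  let vals : List Int := (choices.filter (fun c => pvNames.contains c)).map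
    (fun c => (((PySem.List.index? pvNames c).getD 0 : Nat) : Int) + 1)
  let n : Int := vals.length
  PySem.Int.mod
    (((PySem.List.enumerate vals).map
      (fun p => p.2 * PySem.Int.powMod 13 (n - 1 - p.1).toNat 256)).sum) 256

-- ===== PRECONDITION & SPEC =====
def Spec_calc_seed (choices : List String) (out : Int) : Prop := out = calc_seed_alt choices
instance (choices : List String) (out : Int) : Decidable (Spec_calc_seed choices out) := by unfold Spec_calc_seed; infer_instance

-- ===== CLAIM (what is proved, stated in full; the proofs are below) =====
def Claim_equal_calc_seed : Prop := ∀ (choices : List String), Dom_calc_seed choices → Spec_calc_seed choices (calc_seed choices)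

-- ===== LEMMAS AND PROOFS =====

-- polynomial value of a value list with weight 13^position
def pvG (ws : List Int) : Int := ws.foldr (fun w acc => w + 13 * acc) 0

theorem pvG_append_singleton (ws : List Int) (v : Int) :
    pvG (ws ++ [v]) = pvG ws + 13 ^ ws.length * v := by
  induction ws with
  | nil => simp [pvG]
  | cons w ws ih => simp [pvG] at ih ⊢; rw [ih]; ring

-- A's fold equals the Horner fold over the dict-filtered value list
theorem a_filterMap (choices : List String) (s : Int) :
    choices.foldl (fun seed choice =>
      if pvValueIds.contains choice then
        PySem.Int.mod (seed * 13 + pvValueIds.getD choice 0) 256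
      else seed) s
    = (choices.filterMap (fun c => pvValueIds.get? c)).foldl
        (fun seed v => PySem.Int.mod (seed * 13 + v) 256) s := by
  induction choices generalizing s with
  | nil => rfl
  | cons c cs ih =>
    simp only [List.foldl_cons, List.filterMap_cons]
    rcases h : pvValueIds.get? c with _ | v
    · have hc : pvValueIds.contains c = false := by
        rw [PySem.Dict.contains_eq_isSome_get?, h]; rfl
      simp only [hc, Bool.false_eq_true, if_false]
      exact ih s
    · have hc : pvValueIds.contains c = true := by
        rw [PySem.Dict.contains_eq_isSome_get?, h]; rfl
      have hd : pvValueIds.getD c 0 = v := PySem.Dict.getD_of_get?_eq_some pvValueIds 0 h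
      simp only [hc, if_true, hd, List.foldl_cons]
      exact ih _

theorem emod_helper2 (s v : Int) :
    (s % 256 * 13 + v) % 256 = (s * 13 + v) % 256 := by
  have hs : s % 256 ≡ s [ZMOD 256] := Int.emod_emod_of_dvd s dvd_rfl
  simpa [Int.ModEq] using (hs.mul (Int.ModEq.refl 13)).add (Int.ModEq.refl v)

-- Horner fold characterisation
theorem horner_char (vs : List Int) (s : Int) :
    vs.foldl (fun seed v => (seed * 13 + v) % 256) (s % 256)
    = (13 ^ vs.length * s + pvG vs.reverse) % 256 := by
  induction vs generalizing s with
  | nil => simp [pvG]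
  | cons v vs ih =>
    simp only [List.foldl_cons]
    rw [emod_helper2, ih (s * 13 + v)]
    rw [List.reverse_cons, pvG_append_singleton]
    congr 1
    simp only [List.length_cons, List.length_reverse, pow_succ]
    ring

-- B's lookup (membership in pvNames, position + 1) agrees pointwise with A's dict
theorem point (c : String) :
    (if pvNames.contains c then
      some ((((PySem.List.index? pvNames c).getD 0 : Nat) : Int) + 1)
    else none) = pvValueIds.get? c := by
  by_cases h1 : c = "Money"; · subst h1; decide
  by_cases h2 : c = "Career Success"; · subst h2; decide
  by_cases h3 : c = "Recognition"; · subst h3; decide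
  by_cases h4 : c = "Family Obligations"; · subst h4; decide
  by_cases h5 : c = "Social Status"; · subst h5; decide
  by_cases h6 : c = "Physical Appearance"; · subst h6; decide
  by_cases h7 : c = "Romantic Validation"; · subst h7; decide
  by_cases h8 : c = "Academic Achievement"; · subst h8; decide
  by_cases h9 : c = "Power/Control"; · subst h9; decide
  by_cases h10 : c = "Possessions/Luxury"; · subst h10; decide
  by_cases h11 : c = "Others' Approval"; · subst h11; decide
  by_cases h12 : c = "Competition/Winning"; · subst h12; decide
  have hc : pvNames.contains c = false := by
    simp [pvNames, List.contains_eq_mem]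
    tauto
  have hg : pvValueIds.get? c = none := by
    have hmk : pvValueIds = PySem.Dict.mk
      [("Money", 1), ("Career Success", 2), ("Recognition", 3), ("Family Obligations", 4),
       ("Social Status", 5), ("Physical Appearance", 6), ("Romantic Validation", 7),
       ("Academic Achievement", 8), ("Power/Control", 9), ("Possessions/Luxury", 10),
       ("Others' Approval", 11), ("Competition/Winning", 12)] := by decide
    rw [hmk]
    simp [beq_iff_eq, Ne.symm h1, Ne.symm h2, Ne.symm h3,
      Ne.symm h4, Ne.symm h5, Ne.symm h6, Ne.symm h7, Ne.symm h8, Ne.symm h9,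
      Ne.symm h10, Ne.symm h11, Ne.symm h12, PySem.Dict.get?]
  rw [hc, hg]; simp

-- B's filter-then-map produces the same value list as A's dict filterMap
theorem vals_eq (choices : List String) :
    (choices.filter (fun c => pvNames.contains c)).map
      (fun c => (((PySem.List.index? pvNames c).getD 0 : Nat) : Int) + 1)
    = choices.filterMap (fun c => pvValueIds.get? c) := by
  induction choices with
  | nil => rfl
  | cons c cs ih =>
    have hp := point c
    simp only [List.filter_cons, List.filterMap_cons]
    rcases hcon : pvNames.contains c with _ | _
    · rw [hcon, if_neg (by decide)] at hp
      rw [if_neg (by decide), ← hp]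
      exact ih
    · rw [hcon, if_pos rfl] at hp
      rw [if_pos rfl, ← hp]
      simp only [List.map_cons]
      exact congrArg _ ih

-- the positional-weight sum is the polynomial of the reversed list, mod 256
theorem sum_enum (vs : List Int) (k m : Int) (hk : 0 ≤ k)
    (h : k + vs.length = m + 1) :
    ((PySem.List.enumerate vs k).map
      (fun p => p.2 * PySem.Int.powMod 13 (m - p.1).toNat 256)).sum
    ≡ pvG vs.reverse [ZMOD 256] := by
  induction vs generalizing k with
  | nil => simp [PySem.List.enumerate_nil, pvG]
  | cons v t ih =>
    rw [PySem.List.enumerate_cons]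
    simp only [List.map_cons, List.sum_cons]
    have he : m - k = (t.length : Int) := by
      simp only [List.length_cons] at h; push_cast at h ⊢; omega
    have ht : (m - k).toNat = t.length := by rw [he]; exact Int.toNat_natCast _
    have hterm : v * PySem.Int.powMod 13 (m - k).toNat 256
        ≡ v * 13 ^ t.length [ZMOD 256] := by
      rw [ht, PySem.Int.powMod_eq, PySem.Int.mod_eq_emod_of_pos (by norm_num)]
      exact (Int.ModEq.refl v).mul (Int.emod_emod_of_dvd _ dvd_rfl)
    have hih := ih (k + 1) (by omega) (by simp only [List.length_cons] at h; push_cast at h ⊢; omega)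
    have hsum := hterm.add hih
    have hrhs : pvG (v :: t).reverse = v * 13 ^ t.length + pvG t.reverse := by
      rw [List.reverse_cons, pvG_append_singleton, List.length_reverse]; ring
    rw [hrhs]
    exact hsum

-- ===== VERDICT (by name: the statement is the Claim_ definition above) =====
theorem calc_seed_spec : Claim_equal_calc_seed := by
  intro choices _
  unfold Spec_calc_seed calc_seed calc_seed_alt
  rw [a_filterMap, vals_eq]
  set vs := choices.filterMap (fun c => pvValueIds.get? c) with hvs
  have hA : vs.foldl (fun seed v => PySem.Int.mod (seed * 13 + v) 256) 0
      = pvG vs.reverse % 256 := by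
    simp only [PySem.Int.mod_eq_emod_of_pos (show (0:Int) < 256 by norm_num)]
    rw [show (0 : Int) = 0 % 256 by norm_num, horner_char]
    simp
  have hB := sum_enum vs 0 ((vs.length : Int) - 1) le_rfl (by ring)
  rw [hA, PySem.Int.mod_eq_emod_of_pos (show (0:Int) < 256 by norm_num)]
  exact (hB.symm : _)
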